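-- pv_equiv track=rewrite | github.com/123jimin/ckp | bench/number_theory/iterate_idiv.py | iterate_idiv_new
-- ===== SOURCE A (Python) =====
-- def iterate_idiv_new(x: int):
--     yield(x, 1, 2)
--
--     if x <= 3:
--         if x == 2: yield (1, 2, 3)
--         elif x == 3: yield (1, 2, 4)
--         return
--
--     prev_q = x//2
--
--     for i in range(3, x+1):
--         if (q := x//i) == prev_q: break
--         yield (prev_q, i-1, i)
--         prev_q = q
--
--     i -= 1
--
--     for q in range(prev_q, 1, -1):
--         next_i = x//q + 1
--         yield (q, i, next_i)
--         i = next_i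
--
--     yield(1, i, x+1)
-- ===== SOURCE B (Python) =====
-- def iterate_idiv_new(x: int):
--     yield (x, 1, 2)
--     if x <= 1:
--         return
--     i = 2
--     while i <= x:
--         q = x // i
--         next_i = x // q + 1
--         yield (q, i, next_i)
--         i = next_i
-- ===== Notes on version B (the rewrite author's own statement) =====
-- stated objective: simpler
-- what changed: Replaces A's two-phase traversal (an increasing loop over width-1 blocks with a break, then a decreasing loop over quotient values, then a final yield) by one uniform loop that jumps from each block start i directly to the next boundary x//(x//i)+1.
import Mathlib
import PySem

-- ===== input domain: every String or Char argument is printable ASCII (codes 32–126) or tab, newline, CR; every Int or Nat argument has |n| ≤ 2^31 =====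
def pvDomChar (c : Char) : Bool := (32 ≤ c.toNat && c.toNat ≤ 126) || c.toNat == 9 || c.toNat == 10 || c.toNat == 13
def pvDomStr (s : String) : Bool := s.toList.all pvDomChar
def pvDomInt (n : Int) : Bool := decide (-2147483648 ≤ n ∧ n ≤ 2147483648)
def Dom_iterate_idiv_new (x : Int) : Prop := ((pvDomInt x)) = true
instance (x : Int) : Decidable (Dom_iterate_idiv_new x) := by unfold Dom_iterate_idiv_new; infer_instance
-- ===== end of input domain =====

-- B replaces A's two-phase traversal (increasing width-1 loop with break, then a decreasing
-- loop over quotient values, then a final yield) by one uniform block-jumping loop; objective: simpler.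
-- Both Pythons are generators; the ports return the list of yielded tuples.

-- ===== PORT A =====
-- A's first for-loop (with break): recursion over the values of range(3, x+1), the fuel
-- counts the remaining range elements (so the huge range is never materialized, exactly as
-- Python's lazy range); result = (prev_q, final value of the loop variable i, yields emitted)
def idivLoop1 (x : Int) : Nat → Int → Int → Int × Int × List (Int × Int × Int)
  | 0, prev_q, j => (prev_q, j - 1, [])
  | fuel + 1, prev_q, j =>
    if PySem.Int.floordiv x j = prev_q then (prev_q, j, [])
    else
      let r := idivLoop1 x fuel (PySem.Int.floordiv x j) (j + 1)
      (r.1, r.2.1, (prev_q, j - 1, j) :: r.2.2)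

-- A's second for-loop; result = (final i, yields emitted)
def idivLoop2 (x : Int) : List Int → Int → Int × List (Int × Int × Int)
  | [], i => (i, [])
  | q :: rest, i =>
    let r := idivLoop2 x rest (PySem.Int.floordiv x q + 1)
    (r.1, (q, i, PySem.Int.floordiv x q + 1) :: r.2)

def iterate_idiv_new (x : Int) : List (Int × Int × Int) :=
  if x ≤ 3 then
    (x, 1, 2) :: (if x = 2 then [(1, 2, 3)] else if x = 3 then [(1, 2, 4)] else [])
  else
    -- the range 3..x+1 is non-empty here (x ≥ 4), so the initial loop-variable value
    -- (j - 1 at fuel 0) is never the one returned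
    let s1 := idivLoop1 x (x + 1 - 3).toNat (PySem.Int.floordiv x 2) 3
    let s2 := idivLoop2 x (PySem.List.pyRange s1.1 1 (-1)) (s1.2.1 - 1)
    ((x, 1, 2) :: s1.2.2) ++ s2.2 ++ [(1, s2.1, x + 1)]

-- ===== PORT B =====
-- B's while-loop; the fuel only bounds the iteration count (i strictly increases, so
-- x.toNat iterations always suffice from i = 2)
def idivAltLoop (x : Int) : Nat → Int → List (Int × Int × Int)
  | 0, _ => []
  | fuel + 1, i =>
    if i ≤ x then
      (PySem.Int.floordiv x i, i, PySem.Int.floordiv x (PySem.Int.floordiv x i) + 1)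
        :: idivAltLoop x fuel (PySem.Int.floordiv x (PySem.Int.floordiv x i) + 1)
    else []

def iterate_idiv_new_alt (x : Int) : List (Int × Int × Int) :=
  (x, 1, 2) :: (if x ≤ 1 then [] else idivAltLoop x x.toNat 2)

-- ===== PRECONDITION & SPEC =====
def Spec_iterate_idiv_new (x : Int) (out : List (Int × Int × Int)) : Prop := out = iterate_idiv_new_alt x
instance (x : Int) (out : List (Int × Int × Int)) : Decidable (Spec_iterate_idiv_new x out) := by unfold Spec_iterate_idiv_new; infer_instance

-- ===== CLAIM (what is proved, stated in full; the proofs are below) =====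
def Claim_equal_iterate_idiv_new : Prop := ∀ (x : Int), Dom_iterate_idiv_new x → Spec_iterate_idiv_new x (iterate_idiv_new x)

-- ===== LEMMAS AND PROOFS =====

lemma fd_pos {x i : Int} (h1 : 1 ≤ i) (h2 : i ≤ x) : 1 ≤ PySem.Int.floordiv x i :=
  (PySem.Int.le_floordiv_iff_mul_le (by omega)).2 (by omega)

lemma fd_mul_le (x : Int) {b : Int} (hb : 0 < b) : PySem.Int.floordiv x b * b ≤ x :=
  (PySem.Int.le_floordiv_iff_mul_le hb).1 le_rfl

lemma lt_fd_succ_mul (x : Int) {b : Int} (hb : 0 < b) :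
    x < (PySem.Int.floordiv x b + 1) * b :=
  (PySem.Int.floordiv_lt_iff_lt_mul hb).1 (by omega)

lemma fd_one (x : Int) : PySem.Int.floordiv x 1 = x := by
  rw [PySem.Int.floordiv_eq_ediv_of_pos (by omega)]; exact Int.ediv_one x

-- i ≤ x // (x // i): the block of i extends at least to i
lemma le_fd_fd {x i : Int} (h1 : 1 ≤ i) (h2 : i ≤ x) :
    i ≤ PySem.Int.floordiv x (PySem.Int.floordiv x i) := by
  have hq := fd_pos h1 h2
  refine (PySem.Int.le_floordiv_iff_mul_le (by omega)).2 ?_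
  have := fd_mul_le x (show (0:Int) < i by omega)
  nlinarith

-- quotients are antitone in the (positive) divisor
lemma fd_antitone {x a b : Int} (ha : 0 < a) (hab : a ≤ b) (hx : 0 ≤ PySem.Int.floordiv x b) :
    PySem.Int.floordiv x b ≤ PySem.Int.floordiv x a := by
  refine (PySem.Int.le_floordiv_iff_mul_le ha).2 ?_
  have := fd_mul_le x (show (0:Int) < b by omega)
  nlinarith

-- width-1 block: if the quotient drops from j-1 to j, the block of j-1 ends exactly at j-1
lemma fd_width_one {x j : Int} (h3 : 3 ≤ j) (hj : j ≤ x)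
    (hne : PySem.Int.floordiv x j ≠ PySem.Int.floordiv x (j - 1)) :
    PySem.Int.floordiv x (PySem.Int.floordiv x (j - 1)) = j - 1 := by
  have hq1 : 1 ≤ PySem.Int.floordiv x (j - 1) := fd_pos (by omega) (by omega)
  have hge : j - 1 ≤ PySem.Int.floordiv x (PySem.Int.floordiv x (j - 1)) :=
    le_fd_fd (by omega) (by omega)
  by_contra hcon
  have hj' : j ≤ PySem.Int.floordiv x (PySem.Int.floordiv x (j - 1)) := by omega
  have h1 : PySem.Int.floordiv x (j - 1) ≤ PySem.Int.floordiv x j := by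
    refine (PySem.Int.le_floordiv_iff_mul_le (by omega)).2 ?_
    have := fd_mul_le x (show (0:Int) < PySem.Int.floordiv x (j - 1) by omega)
    nlinarith
  have h2 : PySem.Int.floordiv x j ≤ PySem.Int.floordiv x (j - 1) :=
    fd_antitone (by omega) (by omega) (by have := fd_pos (show (1:Int) ≤ j by omega) hj; omega)
  omega

-- at the break the current block starts strictly above its quotient
lemma fd_break_lt {x j : Int} (h3 : 3 ≤ j) (_hj : j ≤ x)
    (heq : PySem.Int.floordiv x j = PySem.Int.floordiv x (j - 1)) :
    PySem.Int.floordiv x (j - 1) < j - 1 := by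
  have h1 : PySem.Int.floordiv x (j - 1) * j ≤ x := by
    have := fd_mul_le x (show (0:Int) < j by omega)
    rw [heq] at this; exact this
  have h2 : x < (PySem.Int.floordiv x (j - 1) + 1) * (j - 1) := lt_fd_succ_mul x (by omega)
  nlinarith

-- the phase-2 step: once q = x // i with q < i, the next block's quotient is exactly q - 1
lemma fd_step {x q i : Int} (hq : 1 ≤ q) (hqi : q < i) (_hix : i ≤ x)
    (hfd : PySem.Int.floordiv x i = q) :
    PySem.Int.floordiv x (PySem.Int.floordiv x q + 1) = q - 1 := by
  have hmi : i ≤ PySem.Int.floordiv x q := by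
    refine (PySem.Int.le_floordiv_iff_mul_le (by omega)).2 ?_
    have := fd_mul_le x (show (0:Int) < i by omega)
    rw [hfd] at this; nlinarith
  have hup : PySem.Int.floordiv x (PySem.Int.floordiv x q + 1) < q := by
    refine (PySem.Int.floordiv_lt_iff_lt_mul (by omega)).2 ?_
    have := lt_fd_succ_mul x (show (0:Int) < q by omega)
    nlinarith
  have hlo : q - 1 ≤ PySem.Int.floordiv x (PySem.Int.floordiv x q + 1) := by
    refine (PySem.Int.le_floordiv_iff_mul_le (by omega)).2 ?_
    have := fd_mul_le x (show (0:Int) < q by omega)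
    nlinarith
  omega

lemma altLoop_nil {x i : Int} (h : x < i) (fuel : Nat) : idivAltLoop x fuel i = [] := by
  cases fuel with
  | zero => rfl
  | succ f => simp [idivAltLoop, show ¬ i ≤ x by omega]

-- phase 2 of A (+ its final yield) equals B's loop, from any state satisfying the invariant
lemma loop2_eq (x : Int) (n : Nat) : ∀ (q i : Int) (fuel : Nat),
    (q - 1).toNat = n → 1 ≤ q → q < i → i ≤ x → PySem.Int.floordiv x i = q →
    (x + 1 - i).toNat ≤ fuel →
    (idivLoop2 x (PySem.List.pyRange q 1 (-1)) i).2
        ++ [(1, (idivLoop2 x (PySem.List.pyRange q 1 (-1)) i).1, x + 1)]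
      = idivAltLoop x fuel i := by
  induction n with
  | zero =>
    intro q i fuel hn h1 h2 h3 h4 h5
    have hq1 : q = 1 := by omega
    subst hq1
    obtain ⟨f, rfl⟩ : ∃ f, fuel = f + 1 := ⟨fuel - 1, by omega⟩
    rw [PySem.List.pyRange_neg_one_eq_nil le_rfl]
    simp only [idivLoop2, idivAltLoop, if_pos h3, h4, fd_one,
      altLoop_nil (show x < x + 1 by omega) f]
    simp
  | succ n ih =>
    intro q i fuel hn h1 h2 h3 h4 h5
    have hq2 : 2 ≤ q := by omega
    obtain ⟨f, rfl⟩ : ∃ f, fuel = f + 1 := ⟨fuel - 1, by omega⟩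
    have hstep : PySem.Int.floordiv x (PySem.Int.floordiv x q + 1) = q - 1 :=
      fd_step (by omega) h2 h3 h4
    have hm1 : 1 ≤ PySem.Int.floordiv x q := fd_pos (by omega) (by omega)
    have hmi : i ≤ PySem.Int.floordiv x q := by
      refine (PySem.Int.le_floordiv_iff_mul_le (by omega)).2 ?_
      have := fd_mul_le x (show (0:Int) < i by omega)
      rw [h4] at this; nlinarith
    have hmx : PySem.Int.floordiv x q + 1 ≤ x := by
      have : 1 * (PySem.Int.floordiv x q + 1) ≤ x :=
        (PySem.Int.le_floordiv_iff_mul_le (by omega)).1 (by omega)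
      omega
    have hih := ih (q - 1) (PySem.Int.floordiv x q + 1) f (by omega) (by omega) (by omega)
      hmx hstep (by omega)
    rw [PySem.List.pyRange_neg_one_cons (show (1:Int) < q by omega)]
    simp only [idivLoop2, List.cons_append, hih]
    simp [idivAltLoop, if_pos h3, h4]

-- phase 1 of A (followed by phase 2 and the final yield) equals B's loop,
-- from any loop position j with all earlier blocks of width 1
lemma loop1_eq (x : Int) (hx : 4 ≤ x) (n : Nat) :
    ∀ (j : Int) (fuel : Nat),
    3 ≤ j → j ≤ x → (x - j).toNat = n → (x + 2 - j).toNat ≤ fuel →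
    (idivLoop1 x (x + 1 - j).toNat (PySem.Int.floordiv x (j - 1)) j).2.2
      ++ (idivLoop2 x
            (PySem.List.pyRange (idivLoop1 x (x + 1 - j).toNat (PySem.Int.floordiv x (j - 1)) j).1 1 (-1))
            ((idivLoop1 x (x + 1 - j).toNat (PySem.Int.floordiv x (j - 1)) j).2.1 - 1)).2
      ++ [(1, (idivLoop2 x
            (PySem.List.pyRange (idivLoop1 x (x + 1 - j).toNat (PySem.Int.floordiv x (j - 1)) j).1 1 (-1))
            ((idivLoop1 x (x + 1 - j).toNat (PySem.Int.floordiv x (j - 1)) j).2.1 - 1)).1, x + 1)]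
      = idivAltLoop x fuel (j - 1) := by
  induction n with
  | zero =>
    intro j fuel h3 hj hn hf
    have hjx : j = x := by omega
    subst hjx
    have hq1 : PySem.Int.floordiv j j = 1 :=
      (PySem.Int.floordiv_eq_iff_of_pos (by omega)).2 (by constructor <;> nlinarith)
    have hq2 : PySem.Int.floordiv j (j - 1) = 1 :=
      (PySem.Int.floordiv_eq_iff_of_pos (by omega)).2 (by constructor <;> nlinarith)
    rw [show (j + 1 - j).toNat = 1 by omega]
    simp only [idivLoop1, hq1, hq2]
    have h := loop2_eq j 0 1 (j - 1) fuel (by omega) le_rfl (by omega) (by omega)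
      hq2 (by omega)
    simpa using h
  | succ n ih =>
    intro j fuel h3 hj hn hf
    have hjlt : j ≤ x - 1 := by omega
    rw [show (x + 1 - j).toNat = (x - j).toNat + 1 by omega]
    by_cases hbr : PySem.Int.floordiv x j = PySem.Int.floordiv x (j - 1)
    · simp only [idivLoop1, if_pos hbr]
      have hqlt := fd_break_lt h3 hj hbr
      have hq1 : 1 ≤ PySem.Int.floordiv x (j - 1) := fd_pos (by omega) (by omega)
      have h := loop2_eq x (PySem.Int.floordiv x (j - 1) - 1).toNat
        (PySem.Int.floordiv x (j - 1)) (j - 1) fuel rfl hq1 hqlt (by omega) rfl (by omega)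
      simpa using h
    · have hwidth := fd_width_one h3 hj hbr
      obtain ⟨f, rfl⟩ : ∃ f, fuel = f + 1 := ⟨fuel - 1, by omega⟩
      have hih := ih (j + 1) f (by omega) (by omega) (by omega) (by omega)
      rw [show (x + 1 - (j + 1)).toNat = (x - j).toNat by omega] at hih
      simp only [add_sub_cancel_right] at hih
      simp only [idivLoop1, if_neg hbr, List.cons_append, hih]
      simp [idivAltLoop, hwidth]
      omega

-- ===== VERDICT (by name: the statement is the Claim_ definition above) =====
theorem iterate_idiv_new_spec : Claim_equal_iterate_idiv_new := by
  intro x _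
  unfold Spec_iterate_idiv_new
  by_cases hx2 : x = 2
  · subst hx2; decide
  by_cases hx3 : x = 3
  · subst hx3; decide
  by_cases hsmall : x ≤ 3
  · have hx1 : x ≤ 1 := by omega
    simp [iterate_idiv_new, iterate_idiv_new_alt, hsmall, hx2, hx3, hx1]
  · have hx4 : 4 ≤ x := by omega
    simp only [iterate_idiv_new, iterate_idiv_new_alt, if_neg hsmall,
      if_neg (show ¬ x ≤ 1 by omega)]
    have h := loop1_eq x hx4 (x - 3).toNat 3 x.toNat (by omega) (by omega) rfl (by omega)
    rw [show (3:Int) - 1 = 2 by norm_num] at h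
    simp only [List.cons_append, List.append_assoc] at h ⊢
    rw [h]
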